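-- pv_equiv track=rewrite | github.com/muonium-ai/simplegames | minesweeper/cli/game.py | encode_board
-- ===== SOURCE A (Python) =====
-- def encode_board(board):
--     def to_base62(num):
--         chars = "0123456789abcdefghijklmnopqrstuvwxyzABCDEFGHIJKLMNOPQRSTUVWXYZ"
--         base = len(chars)
--         result = []
--         while num > 0:
--             result.append(chars[num % base])
--             num //= base
--         return ''.join(reversed(result)) or '0'
--
--     # Flatten the board and convert to a binary string
--     binary_string = ''.join('1' if cell else '0' for row in board for cell in row)
--
--     # Split the binary string into chunks of 6 bits
--     chunks = [binary_string[i:i+6] for i in range(0, len(binary_string), 6)]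
--
--     # Convert each chunk to an integer and then to base62
--     base62_encoded = ''.join(to_base62(int(chunk, 2)) for chunk in chunks)
--
--     return base62_encoded
-- ===== SOURCE B (Python) =====
-- def encode_board(board):
--     def to_base62(num):
--         chars = "0123456789abcdefghijklmnopqrstuvwxyzABCDEFGHIJKLMNOPQRSTUVWXYZ"
--         base = len(chars)
--         result = []
--         while num > 0:
--             result.append(chars[num % base])
--             num //= base
--         return ''.join(reversed(result)) or '0'
--
--     out = []
--     acc = 0
--     cnt = 0
--     for row in board:
--         for cell in row:
--             acc = acc * 2 + (1 if cell else 0)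
--             cnt += 1
--             if cnt == 6:
--                 out.append(to_base62(acc))
--                 acc = 0
--                 cnt = 0
--     if cnt > 0:
--         out.append(to_base62(acc))
--     return ''.join(out)
-- ===== Notes on version B (the rewrite author's own statement) =====
-- stated objective: alternative
-- what changed: Replaces the build-binary-string / slice-into-6-char-chunks / reparse-with-int(,2) pipeline by a single pass over the cells that maintains a running integer accumulator and bit counter, emitting a base62 digit group every 6 bits and flushing leftovers at the end.
import Mathlib
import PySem

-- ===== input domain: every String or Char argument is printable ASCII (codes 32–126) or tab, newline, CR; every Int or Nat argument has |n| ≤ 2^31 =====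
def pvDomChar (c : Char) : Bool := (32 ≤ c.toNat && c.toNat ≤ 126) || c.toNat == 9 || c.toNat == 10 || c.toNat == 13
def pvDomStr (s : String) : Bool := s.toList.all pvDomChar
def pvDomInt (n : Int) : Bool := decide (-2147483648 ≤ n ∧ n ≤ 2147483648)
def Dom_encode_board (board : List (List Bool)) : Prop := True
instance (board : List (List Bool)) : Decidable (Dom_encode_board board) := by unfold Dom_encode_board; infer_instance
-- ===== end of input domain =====

-- B replaces A's binary-string + slice-chunks + int(,2) pipeline by a single pass with a
-- running accumulator and bit counter (alternative decomposition, same asymptotic cost).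


-- shared helper: the nested `to_base62` (identical in A's source and in Source B)
def pvB62Chars : List Char := "0123456789abcdefghijklmnopqrstuvwxyzABCDEFGHIJKLMNOPQRSTUVWXYZ".toList

-- the `while num > 0` loop (result accumulated in append order, reversed by the caller)
def pvToBase62Loop (num : Nat) (result : List Char) : List Char :=
  if num > 0 then pvToBase62Loop (num / 62) (result ++ [pvB62Chars.getD (num % 62) '0'])
  else result
termination_by num
decreasing_by omega

def pvToBase62 (num : Nat) : String :=
  let s := String.mk (pvToBase62Loop num []).reverse
  if s = "" then "0" else s

-- ===== PORT A =====
-- int(chunk, 2) ported by hand (exact: A only passes nonempty strings of '0'/'1')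
def pvBinVal (s : List Char) : Nat :=
  s.foldl (fun a c => a * 2 + (if c = '1' then 1 else 0)) 0

def encode_board (board : List (List Bool)) : String :=
  let binary : List Char :=
    board.flatMap (fun row => row.map (fun cell => if cell then '1' else '0'))
  let chunks : List (List Char) :=
    (PySem.List.pyRange 0 (binary.length : Int) 6).map
      (fun i => PySem.List.slice binary (some i) (some (i + 6)))
  String.mk ((chunks.map (fun chunk => (pvToBase62 (pvBinVal chunk)).toList)).flatten)

-- ===== PORT B =====
-- the body of B's inner loop: update (acc, cnt, out) for one cell
def pvStep (st : Nat × Nat × List Char) (cell : Bool) : Nat × Nat × List Char :=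
  let acc := st.1 * 2 + (if cell then 1 else 0)
  let cnt := st.2.1 + 1
  if cnt = 6 then (0, 0, st.2.2 ++ (pvToBase62 acc).toList) else (acc, cnt, st.2.2)

def encode_board_alt (board : List (List Bool)) : String :=
  let st := board.foldl (fun st row => row.foldl pvStep st) (0, 0, ([] : List Char))
  String.mk (if st.2.1 > 0 then st.2.2 ++ (pvToBase62 st.1).toList else st.2.2)

-- ===== PRECONDITION & SPEC =====
def Spec_encode_board (board : List (List Bool)) (out : String) : Prop := out = encode_board_alt board
instance (board : List (List Bool)) (out : String) : Decidable (Spec_encode_board board out) := by unfold Spec_encode_board; infer_instance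

-- ===== CLAIM (what is proved, stated in full; the proofs are below) =====
def Claim_equal_encode_board : Prop := ∀ (board : List (List Bool)), Dom_encode_board board → Spec_encode_board board (encode_board board)

-- ===== LEMMAS AND PROOFS =====

-- 6-element chunking, stated structurally (proof-only helper)
def chunks6 {α : Type} : List α → List (List α)
  | [] => []
  | a :: b :: c :: d :: e :: f :: rest => [a, b, c, d, e, f] :: chunks6 rest
  | l => [l]

lemma pyRange_six (n : Nat) :
    PySem.List.pyRange 0 (n : Int) 6 =
      (List.range ((n + 5) / 6)).map (fun k => ((6 * k : Nat) : Int)) := by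
  rw [PySem.List.pyRange_of_pos _ _ (by norm_num)]
  have h1 : (fun k : Nat => (0 : Int) + 6 * (k : Int)) = fun k : Nat => ((6 * k : Nat) : Int) := by
    funext k; push_cast; ring
  have h2 : (if (0 : Int) < (n : Int) then (((n : Int) - 0 + 6 - 1) / 6).toNat else 0) = (n + 5) / 6 := by
    split_ifs with h
    · omega
    · omega
  rw [h1, h2]

lemma chunks6_eq_range {α : Type} (l : List α) :
    (List.range ((l.length + 5) / 6)).map (fun k => (l.drop (6 * k)).take 6) = chunks6 l := by
  induction l using chunks6.induct with
  | case1 => simp [chunks6]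
  | case2 a b c d e f rest ih =>
    have hm : ((a :: b :: c :: d :: e :: f :: rest).length + 5) / 6
        = ((rest.length + 5) / 6) + 1 := by simp; omega
    rw [hm, List.range_succ_eq_map, List.map_cons, List.map_map]
    simp only [chunks6]
    refine congrArg₂ List.cons (by simp) ?_
    rw [← ih]
    apply List.map_congr_left
    intro k _
    have hd : List.drop (6 * (k + 1)) (a :: b :: c :: d :: e :: f :: rest)
        = List.drop (6 * k) rest := by
      rw [show 6 * (k + 1) = 6 * k + 1 + 1 + 1 + 1 + 1 + 1 by ring]
      simp [List.drop_succ_cons]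
    simp [Function.comp, hd]
  | case3 l h1 h2 =>
    rcases l with _ | ⟨a, _ | ⟨b, _ | ⟨c, _ | ⟨d, _ | ⟨e, _ | ⟨f, t⟩⟩⟩⟩⟩⟩
    · exact absurd rfl h1
    all_goals first
      | (exact absurd rfl (h2 _ _ _ _ _ _ _))
      | (simp [chunks6, List.range_succ_eq_map])

lemma binVal_map (c : List Bool) (a : Nat) :
    ((c.map (fun cell => if cell then '1' else '0')).foldl
        (fun a ch => a * 2 + (if ch = '1' then 1 else 0)) a)
      = c.foldl (fun a b => a * 2 + (if b then 1 else 0)) a := by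
  induction c generalizing a with
  | nil => rfl
  | cons x xs ih => cases x <;> simp [List.foldl_cons, ih]

lemma chunks6_map {α β : Type} (f : α → β) (l : List α) :
    chunks6 (l.map f) = (chunks6 l).map (List.map f) := by
  induction l using chunks6.induct with
  | case1 => simp [chunks6]
  | case2 a b c d e f' rest ih => simp [chunks6, ih]
  | case3 l h1 h2 =>
    rcases l with _ | ⟨a, _ | ⟨b, _ | ⟨c, _ | ⟨d, _ | ⟨e, _ | ⟨f', t⟩⟩⟩⟩⟩⟩
    · exact absurd rfl h1
    all_goals first
      | (exact absurd rfl (h2 _ _ _ _ _ _ _))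
      | (simp [chunks6])

lemma main_fold (bits : List Bool) (out : List Char) :
    (if (bits.foldl pvStep (0, 0, out)).2.1 > 0
     then (bits.foldl pvStep (0, 0, out)).2.2 ++ (pvToBase62 (bits.foldl pvStep (0, 0, out)).1).toList
     else (bits.foldl pvStep (0, 0, out)).2.2)
      = out ++ ((chunks6 bits).map
            (fun c => (pvToBase62 (c.foldl (fun a b => a * 2 + (if b then 1 else 0)) 0)).toList)).flatten := by
  induction bits using chunks6.induct generalizing out with
  | case1 => simp [chunks6]
  | case2 a b c d e f rest ih =>
    simp only [List.foldl_cons, chunks6, List.map_cons, List.flatten_cons]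
    have hstep : pvStep (pvStep (pvStep (pvStep (pvStep (pvStep (0, 0, out) a) b) c) d) e) f
        = (0, 0, out ++ (pvToBase62
            ((((((0 * 2 + (if a then 1 else 0)) * 2 + (if b then 1 else 0)) * 2
              + (if c then 1 else 0)) * 2 + (if d then 1 else 0)) * 2
              + (if e then 1 else 0)) * 2 + (if f then 1 else 0))).toList) := by
      simp [pvStep]
    rw [hstep, ih]
    simp [List.append_assoc]
  | case3 l h1 h2 =>
    rcases l with _ | ⟨a, _ | ⟨b, _ | ⟨c, _ | ⟨d, _ | ⟨e, _ | ⟨f, t⟩⟩⟩⟩⟩⟩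
    · exact absurd rfl h1
    all_goals first
      | (exact absurd rfl (h2 _ _ _ _ _ _ _))
      | (simp [chunks6, pvStep, List.foldl_cons])

lemma flatMap_map_eq (board : List (List Bool)) (f : Bool → Char) :
    board.flatMap (fun row => row.map f) = (board.flatten).map f := by
  induction board with
  | nil => rfl
  | cons r rs ih => simp [List.flatMap_cons, ih]

lemma foldl_nested (board : List (List Bool)) (init : Nat × Nat × List Char) :
    board.foldl (fun st row => row.foldl pvStep st) init = (board.flatten).foldl pvStep init := by
  induction board generalizing init with
  | nil => rfl
  | cons r rs ih => simp [List.foldl_cons, List.flatten_cons, List.foldl_append, ih]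

lemma chunks_slice_eq (l : List Char) :
    (PySem.List.pyRange 0 (l.length : Int) 6).map
        (fun i => PySem.List.slice l (some i) (some (i + 6)))
      = chunks6 l := by
  rw [pyRange_six, List.map_map, ← chunks6_eq_range]
  apply List.map_congr_left
  intro k _
  show PySem.List.slice l (some ((6 * k : Nat) : Int)) (some (((6 * k : Nat) : Int) + 6)) = _
  have h6 : ((6 * k : Nat) : Int) + 6 = ((6 * k : Nat) : Int) + ((6 : Nat) : Int) := by norm_cast
  rw [h6, PySem.List.slice_natCast_add]

-- ===== VERDICT (by name: the statement is the Claim_ definition above) =====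
theorem encode_board_spec : Claim_equal_encode_board := by
  intro board _
  unfold Spec_encode_board encode_board encode_board_alt
  simp only []
  rw [flatMap_map_eq, chunks_slice_eq, foldl_nested]
  have hmain := main_fold board.flatten []
  simp only [List.nil_append] at hmain
  rw [chunks6_map, hmain, List.map_map]
  refine congrArg (fun L : List (List Char) => String.mk L.flatten) ?_
  apply List.map_congr_left
  intro c _
  simp [Function.comp, pvBinVal, binVal_map]
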